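-- pv_equiv track=rewrite | github.com/kori-lab/Violet | src/utils/treeFiles.py | resumeFileName
-- ===== SOURCE A (Python) =====
-- def resumeFileName(fileName):
--
--     fileNameList = list(fileName);
--     result = '';
--
--     for letter in fileNameList:
--
--         if letter.isupper():
--             result += ' '+ letter;
--
--         else:
--             result += letter;
--
--     return result.capitalize();
-- ===== SOURCE B (Python) =====
-- def resumeFileName(fileName):
--     table = {ord(c): ' ' + c for c in set(fileName) if c.isupper()}
--     return fileName.translate(table).capitalize()
-- ===== Notes on version B (the rewrite author's own statement) =====
-- stated objective: idiomatic
-- what changed: Replaces the explicit per-character branch-and-concatenate loop with a codepoint translation table built once from the distinct uppercase characters and a single C-level str.translate pass, followed by the same capitalize.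
import Mathlib
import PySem

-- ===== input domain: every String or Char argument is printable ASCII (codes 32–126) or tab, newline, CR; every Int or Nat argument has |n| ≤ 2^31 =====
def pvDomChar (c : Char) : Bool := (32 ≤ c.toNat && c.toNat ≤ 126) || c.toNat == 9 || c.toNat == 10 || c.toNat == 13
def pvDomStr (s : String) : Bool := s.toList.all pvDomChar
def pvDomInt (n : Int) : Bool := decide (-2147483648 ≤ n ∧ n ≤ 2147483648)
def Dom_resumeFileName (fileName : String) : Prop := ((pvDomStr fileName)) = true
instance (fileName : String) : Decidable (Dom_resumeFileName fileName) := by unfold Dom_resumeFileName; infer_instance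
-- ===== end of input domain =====

-- B replaces A's per-character branch-and-concatenate loop by a codepoint→replacement
-- translation table built once from the distinct uppercase characters, applied in one
-- str.translate pass (objective: idiomatic; same asymptotic cost).

-- str.capitalize, ported by hand (library call made by both Pythons): exact on ASCII,
-- where Python's title-casing of the first character coincides with upper-casing.
def pyCapitalize (cs : List Char) : List Char :=
  match cs with
  | [] => []
  | c :: rest => PySem.Chars.upperChar c :: rest.map PySem.Chars.lowerChar

-- ===== PORT A =====
def resumeFileName (fileName : String) : String :=
  let fileNameList := fileName.toList
  let result : List Char :=
    fileNameList.foldl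
      (fun result letter =>
        if PySem.Chars.isupper letter then result ++ [' ', letter]
        else result ++ [letter])
      []
  String.mk (pyCapitalize result)

-- ===== PORT B =====
-- str.translate, ported by hand: each character whose codepoint is a key of the table is
-- replaced by the mapped string, others are kept; exact for a table of string values.
def pyTranslate (cs : List Char) (table : PySem.Dict Int (List Char)) : List Char :=
  cs.flatMap (fun c => (table.get? (c.toNat : Int)).getD [c])

def resumeFileName_alt (fileName : String) : String :=
  let table : PySem.Dict Int (List Char) :=
    (PySem.Set.ofList fileName.toList).foldl
      (fun d c =>
        if PySem.Chars.isupper c then d.insert ((c.toNat : Nat) : Int) [' ', c] else d)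
      (PySem.Dict.mk [])
  String.mk (pyCapitalize (pyTranslate fileName.toList table))

-- ===== PRECONDITION & SPEC =====
def Spec_resumeFileName (fileName : String) (out : String) : Prop := out = resumeFileName_alt fileName
instance (fileName : String) (out : String) : Decidable (Spec_resumeFileName fileName out) := by unfold Spec_resumeFileName; infer_instance

-- ===== CLAIM (what is proved, stated in full; the proofs are below) =====
def Claim_equal_resumeFileName : Prop := ∀ (fileName : String), Dom_resumeFileName fileName → Spec_resumeFileName fileName (resumeFileName fileName)

-- ===== LEMMAS AND PROOFS =====

theorem char_toNat_inj {c x : Char} (h : c.toNat = x.toNat) : c = x :=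
  Char.ext (UInt32.toNat_inj.mp h)

-- lookup in the table built by B's dict-comprehension fold
theorem get?_tableFold (l : List Char) (d : PySem.Dict Int (List Char)) (c : Char) :
    (l.foldl
      (fun d x =>
        if PySem.Chars.isupper x then d.insert ((x.toNat : Nat) : Int) [' ', x] else d)
      d).get? ((c.toNat : Nat) : Int)
    = if PySem.Chars.isupper c = true ∧ c ∈ l then some [' ', c]
      else d.get? ((c.toNat : Nat) : Int) := by
  induction l generalizing d with
  | nil => simp
  | cons x xs ih =>
    simp only [List.foldl_cons, ih, List.mem_cons]
    by_cases hup : PySem.Chars.isupper c = true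
    · by_cases hxs : c ∈ xs
      · simp [hup, hxs]
      · by_cases hcx : c = x
        · subst hcx
          simp [hup, hxs, PySem.Dict.get?_insert_self]
        · have hne : ((c.toNat : Nat) : Int) ≠ ((x.toNat : Nat) : Int) := by
            intro h
            exact hcx (char_toNat_inj (by exact_mod_cast h))
          by_cases hxup : PySem.Chars.isupper x = true
          · simp [hup, hxs, hcx, hxup, PySem.Dict.get?_insert_of_ne _ _ hne]
          · simp [hup, hxs, hcx, hxup]
    · have hne : ∀ (x : Char), c ≠ x → ((c.toNat : Nat) : Int) ≠ ((x.toNat : Nat) : Int) := by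
        intro x h hh
        exact h (char_toNat_inj (by exact_mod_cast hh))
      by_cases hcx : c = x
      · subst hcx; simp [hup]
      · by_cases hxup : PySem.Chars.isupper x = true
        · simp [hup, PySem.Dict.get?_insert_of_ne _ _ (hne x hcx), hxup]
        · simp [hup, hxup]

theorem empty_get? (k : Int) : (PySem.Dict.mk [] : PySem.Dict Int (List Char)).get? k = none := by
  simp [PySem.Dict.get?]

-- ===== VERDICT (by name: the statement is the Claim_ definition above) =====
theorem resumeFileName_spec : Claim_equal_resumeFileName := by
  intro fileName _
  unfold Spec_resumeFileName resumeFileName resumeFileName_alt pyTranslate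
  simp only
  congr 1
  congr 1
  -- A's loop as a flatMap
  have hA :
      fileName.toList.foldl
        (fun result letter =>
          if PySem.Chars.isupper letter then result ++ [' ', letter]
          else result ++ [letter]) []
      = fileName.toList.flatMap
          (fun c => if PySem.Chars.isupper c then [' ', c] else [c]) := by
    have := PySem.List.foldl_append_eq_flatMap
      (l := fileName.toList)
      (g := fun c => if PySem.Chars.isupper c then [' ', c] else [c]) (acc := [])
    rw [show (fun (result : List Char) letter =>
          if PySem.Chars.isupper letter then result ++ [' ', letter]
          else result ++ [letter])
        = (fun result c =>
            result ++ (if PySem.Chars.isupper c then [' ', c] else [c])) by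
      funext r c; by_cases h : PySem.Chars.isupper c = true <;> simp [h]]
    simpa using this
  rw [hA]
  -- B's translate pass as the same flatMap, member by member
  rw [List.flatMap_eq_foldl, List.flatMap_eq_foldl]
  apply PySem.List.foldl_congr_mem
  intro acc c hc
  have hmem : c ∈ PySem.Set.ofList fileName.toList :=
    (PySem.Set.mem_ofList _ _).mpr hc
  rw [get?_tableFold]
  by_cases h : PySem.Chars.isupper c = true
  · simp [h, hmem]
  · simp [h, empty_get?]
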